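-- pv_equiv track=rewrite | github.com/uWindsorCSS/January2016ContestSolutions | solution3.py | configurations
-- ===== SOURCE A (Python) =====
-- MIN_CAR_LENGTH = 3
--
-- cache = {}
--
-- def configurations(open_blocks):
--     # If the number of open blocks is less than 0, we are done.
--     if open_blocks < 0:
--         return 1
--
--     # Check to see if we have solved this already.
--     if open_blocks in cache:
--         return cache[open_blocks]
--
--     # There is always at least one solution, as we can leave the rest of the
--     # parking lot empty.
--     ret = 1
--
--     # We can place a car in any open spot that is at least 3 away from the end.
--     for offset in range(0, open_blocks - MIN_CAR_LENGTH + 1):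
--          # Vary the length of the car.
--         for car_length in range(MIN_CAR_LENGTH, open_blocks - offset + 1):
--             # Subtract an extra one for the empty space.
--             ret += configurations(open_blocks - offset - car_length - 1)
--
--     cache[open_blocks] = ret
--     return ret
-- ===== SOURCE B (Python) =====
-- def configurations(open_blocks):
--     # O(n) double-prefix-sum DP: f(n) = n - 1 + T(n-2) for n >= 3, where
--     # S(k) = sum_{j<k} f(j) and T(k) = sum_{j<k} S(j); constant memory.
--     if open_blocks < 3:
--         return 1
--     s = 0
--     t = 0
--     a, b, c, d = 0, 1, 1, 1
--     cur = 1
--     for m in range(3, open_blocks + 1):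
--         s += a
--         t += s
--         cur = m - 1 + t
--         a, b, c, d = b, c, d, cur
--     return cur
-- ===== Notes on version B (the rewrite author's own statement) =====
-- stated objective: faster
-- what changed: Replaced the doubly-nested summation over memoized recursive calls by the closed recurrence f(n)=n-1+T(n-2) computed with two running prefix sums in one O(n) constant-memory loop; Pre_ excludes large inputs on which A overflows CPython's recursion limit (RecursionError).
import Mathlib
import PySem

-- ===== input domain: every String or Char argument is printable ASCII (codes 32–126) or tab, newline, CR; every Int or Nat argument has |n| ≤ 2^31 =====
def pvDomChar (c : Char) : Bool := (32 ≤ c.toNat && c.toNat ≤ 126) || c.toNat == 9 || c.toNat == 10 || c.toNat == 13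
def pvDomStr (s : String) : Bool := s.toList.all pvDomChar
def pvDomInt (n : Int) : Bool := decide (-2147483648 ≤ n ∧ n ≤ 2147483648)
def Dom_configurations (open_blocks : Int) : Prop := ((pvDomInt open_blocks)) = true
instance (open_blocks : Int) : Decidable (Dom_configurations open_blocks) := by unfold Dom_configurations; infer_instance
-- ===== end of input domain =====

-- B replaces A's doubly-nested summation over memoized recursive calls by one linear prefix-sum loop (objective: faster); equivalence is about the return value only (A also mutates a module-level cache dict).

-- ===== PORT A =====
-- A's recursion with its module-level 'cache' dict threaded through explicitly (here a hash map
-- keyed by Int, A's key type); the Nat fuel only makes the recursion structural (fuel =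
-- open_blocks.toNat + 1 always suffices: every recursive argument is ≤ n - 4), it never changes
-- the computed value.
def configMemo (fuel : Nat) (n : Int) (cache : Std.HashMap Int Int) :
    Int × Std.HashMap Int Int :=
  if n < 0 then (1, cache)
  else
    match cache[n]? with
    | some v => (v, cache)
    | none =>
      match fuel with
      | 0 => (1, cache)  -- unreachable: the wrapper supplies fuel > n
      | f + 1 =>
        let r := (PySem.List.pyRange 0 (n - 3 + 1) 1).foldl (fun p offset =>
          (PySem.List.pyRange 3 (n - offset + 1) 1).foldl (fun q c =>
            let rc := configMemo f (n - offset - c - 1) q.2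
            (q.1 + rc.1, rc.2)) p) (1, cache)
        (r.1, r.2.insert n r.1)

def configurations (open_blocks : Int) : Int :=
  (configMemo (open_blocks.toNat + 1) open_blocks ∅).1

-- ===== PORT B =====
-- state = (s, t, a, b, c, d, cur), exactly the variables of Source B's loop
def altStep (st : Int × Int × Int × Int × Int × Int × Int) (m : Int) :
    Int × Int × Int × Int × Int × Int × Int :=
  match st with
  | (s, t, a, b, c, d, _cur) =>
    let s' := s + a
    let t' := t + s'
    let cur' := m - 1 + t'
    (s', t', b, c, d, cur', cur')

def configurations_alt (open_blocks : Int) : Int :=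
  if open_blocks < 3 then 1
  else
    ((PySem.List.pyRange 3 (open_blocks + 1) 1).foldl altStep
      (0, 0, 0, 1, 1, 1, 1)).2.2.2.2.2.2

-- ===== PRECONDITION & SPEC =====
-- Pre_ excludes large inputs: A's first descent recurses once per 4 open blocks, so for
-- open_blocks ≳ 4000 CPython's recursion limit makes A raise RecursionError; the bound 3000 is
-- conservative because the exact cutoff depends on the stack depth already used by A's caller.
def Pre_configurations (open_blocks : Int) : Prop := open_blocks ≤ 3000
instance (open_blocks : Int) : Decidable (Pre_configurations open_blocks) := by unfold Pre_configurations; infer_instance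
def pvWitness_configurations : Int := 5

def Spec_configurations (open_blocks : Int) (out : Int) : Prop := out = configurations_alt open_blocks
instance (open_blocks : Int) (out : Int) : Decidable (Spec_configurations open_blocks out) := by unfold Spec_configurations; infer_instance

-- ===== CLAIM (what is proved, stated in full; the proofs are below) =====
def Claim_equal_configurations : Prop := ∀ (open_blocks : Int), Dom_configurations open_blocks → Pre_configurations open_blocks → Spec_configurations open_blocks (configurations open_blocks)

-- ===== LEMMAS AND PROOFS =====

-- the state of B's loop after i iterations
def Bstate : Nat → Int × Int × Int × Int × Int × Int × Int
  | 0 => (0, 0, 0, 1, 1, 1, 1)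
  | i + 1 => altStep (Bstate i) (3 + i)

-- the number sequence both programs compute, and its prefix sums
def fI (k : Nat) : Int := if k < 3 then 1 else (Bstate (k - 2)).2.2.2.2.2.2

def SI : Nat → Int
  | 0 => 0
  | j + 1 => SI j + fI j

def TI : Nat → Int
  | 0 => 0
  | j + 1 => TI j + SI j

-- the value of a recursive call of A at argument x (established in configMemo_eq)
def g (x : Int) : Int := if x < 0 then 1 else fI x.toNat

lemma foldl_Bstate (i : Nat) :
    (PySem.List.pyRange 3 (3 + (i : Int)) 1).foldl altStep (0, 0, 0, 1, 1, 1, 1) = Bstate i := by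
  induction i with
  | zero => simp [PySem.List.pyRange_one_eq_nil, Bstate]
  | succ j ih =>
    have : (3 : Int) + ((j + 1 : Nat) : Int) = (3 + (j : Int)) + 1 := by push_cast; ring
    rw [this, PySem.List.pyRange_one_succ_right (by omega), List.foldl_append]
    simp [ih, Bstate]

lemma Bstate_inv (i : Nat) :
    Bstate (i + 1) = (SI i, TI (i + 1), fI i, fI (i + 1), fI (i + 2), fI (i + 3), fI (i + 3)) := by
  induction i with
  | zero => decide
  | succ j ih =>
    have hfI : fI (j + 4) = 3 + ((j : Int) + 1) - 1 + (TI j + SI j + (SI j + fI j)) := by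
      have h1 : fI (j + 4) = (Bstate (j + 2)).2.2.2.2.2.2 := by simp [fI]
      rw [h1]
      show (altStep (Bstate (j + 1)) (3 + ((j + 1 : Nat) : Int))).2.2.2.2.2.2 = _
      rw [ih]
      simp only [altStep, TI]
      push_cast
      ring
    show altStep (Bstate (j + 1)) (3 + ((j + 1 : Nat) : Int)) = _
    rw [ih]
    simp only [altStep, Prod.mk.injEq]
    have h4 : j + 1 + 3 = j + 4 := by omega
    refine ⟨by simp only [SI], by simp only [SI, TI]; try ring, trivial, trivial, trivial, ?_, ?_⟩ <;>
      · rw [h4, hfI]; simp only [TI]; push_cast; ring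

lemma fI_closed (k : Nat) : fI (k + 3) = ((k : Int) + 3) - 1 + TI (k + 1) := by
  cases k with
  | zero => decide
  | succ j =>
    have h1 : fI (j + 1 + 3) = (Bstate (j + 2)).2.2.2.2.2.2 := by simp [fI]
    rw [h1]
    show (altStep (Bstate (j + 1)) (3 + ((j + 1 : Nat) : Int))).2.2.2.2.2.2 = _
    rw [Bstate_inv j]
    simp only [altStep, TI, SI]
    push_cast
    ring

lemma alt_eq_fI (n : Int) : configurations_alt n = g n := by
  by_cases h3 : n < 3
  · rw [configurations_alt, if_pos h3]
    rcases lt_or_ge n 0 with h | h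
    · rw [g, if_pos h]
    · rw [g, if_neg (by omega), fI, if_pos (by omega)]
  · have hn : (3 : Int) + ((n - 2).toNat : Int) = n + 1 := by omega
    rw [configurations_alt, if_neg h3, ← hn, foldl_Bstate]
    have h2 : (n - 2).toNat = n.toNat - 2 := by omega
    have h4 : g n = (Bstate (n.toNat - 2)).2.2.2.2.2.2 := by
      simp only [g, fI, if_neg (by omega : ¬ n < 0), if_neg (by omega : ¬ n.toNat < 3)]
    rw [h2, h4]

lemma sum_g_shift (l : Nat) : (∑ j ∈ Finset.range (l + 1), g ((j : Int) - 1)) = 1 + SI l := by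
  induction l with
  | zero => simp [g, SI]
  | succ j ih =>
    rw [Finset.sum_range_succ, ih]
    have h1 : ((j + 1 : Nat) : Int) - 1 = (j : Int) := by push_cast; ring
    rw [h1, g, if_neg (by omega), Int.toNat_natCast]
    simp only [SI]
    ring

lemma innerSumA (N : Int) (hN : 3 ≤ N) (init : Int) :
    (PySem.List.pyRange 3 (N + 1) 1).foldl (fun r c => r + g (N - c - 1)) init
      = init + (1 + SI (N - 3).toNat) := by
  rw [PySem.List.pyRange_one, List.foldl_map,
    PySem.List.foldl_add (g := fun k : Nat => g (N - (3 + (k : Int)) - 1))]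
  congr 1
  have hm : (N + 1 - 3).toNat = (N - 2).toNat := by omega
  rw [hm]
  have h0 : ((List.range ((N - 2).toNat)).map (fun k : Nat => g (N - (3 + (k : Int)) - 1))).sum
      = ∑ i ∈ Finset.range ((N - 2).toNat), g (N - (3 + (i : Int)) - 1) := rfl
  rw [h0]
  set m := (N - 2).toNat with hmdef
  have hrefl : (∑ i ∈ Finset.range m, g (N - (3 + (i : Int)) - 1))
      = ∑ i ∈ Finset.range m, (fun j : Nat => g ((j : Int) - 1)) (m - 1 - i) := by
    apply Finset.sum_congr rfl
    intro i hi
    have hi' : i < m := Finset.mem_range.mp hi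
    have : ((m - 1 - i : Nat) : Int) = N - 3 - (i : Int) := by omega
    simp only [this]
    congr 1
    ring
  rw [hrefl, Finset.sum_range_reflect (fun j : Nat => g ((j : Int) - 1)) m]
  have hm1 : m = (m - 1) + 1 := by omega
  rw [hm1, sum_g_shift]
  have : m - 1 = (N - 3).toNat := by omega
  rw [this]

def MemoInv (cache : Std.HashMap Int Int) : Prop :=
  ∀ k v, cache[k]? = some v → v = g k

lemma TI_eq (k : Nat) : TI k = ∑ j ∈ Finset.range k, SI j := by
  induction k with
  | zero => simp [TI]
  | succ j ih => simp [TI, ih, Finset.sum_range_succ]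

lemma innerMapSum (N : Int) (hN : 3 ≤ N) :
    ((PySem.List.pyRange 3 (N + 1) 1).map (fun c => g (N - c - 1))).sum
      = 1 + SI (N - 3).toNat := by
  have h1 := innerSumA N hN 0
  rw [PySem.List.foldl_add (PySem.List.pyRange 3 (N + 1) 1) (fun c => g (N - c - 1)) 0] at h1
  omega

lemma outerFoldSum (n : Int) (h3 : 3 ≤ n) :
    (PySem.List.pyRange 0 (n - 3 + 1) 1).foldl
      (fun r offset => r + (1 + SI (n - offset - 3).toNat)) 1 = g n := by
  rw [PySem.List.pyRange_one, List.foldl_map,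
    PySem.List.foldl_add (g := fun k : Nat => 1 + SI (n - (0 + (k : Int)) - 3).toNat)]
  set m := (n - 2).toNat with hmdef
  have hm : (n - 3 + 1 - 0).toNat = m := by omega
  rw [hm]
  have h0 : ((List.range m).map (fun k : Nat => 1 + SI (n - (0 + (k : Int)) - 3).toNat)).sum
      = ∑ i ∈ Finset.range m, (1 + SI (n - (0 + (i : Int)) - 3).toNat) := rfl
  rw [h0, Finset.sum_add_distrib, Finset.sum_const, Finset.card_range]
  have hrefl : (∑ i ∈ Finset.range m, SI ((n - (0 + (i : Int)) - 3).toNat))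
      = ∑ i ∈ Finset.range m, (fun j : Nat => SI j) (m - 1 - i) := by
    apply Finset.sum_congr rfl
    intro i hi
    have hi' : i < m := Finset.mem_range.mp hi
    have : (n - (0 + (i : Int)) - 3).toNat = m - 1 - i := by omega
    rw [this]
  rw [hrefl, Finset.sum_range_reflect (fun j : Nat => SI j) m, ← TI_eq]
  have hg : g n = n - 1 + TI m := by
    have h4 : n.toNat = (n.toNat - 3) + 3 := by omega
    rw [g, if_neg (by omega), h4, fI_closed]
    have h5 : ((n.toNat - 3 : Nat) : Int) = n - 3 := by omega
    have h6 : n.toNat - 3 + 1 = m := by omega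
    rw [h5, h6]
    ring
  rw [hg, nsmul_eq_mul]
  have h7 : (m : Int) = n - 2 := by omega
  rw [h7]
  ring

lemma configMemo_eq (fuel : Nat) : ∀ (n : Int) (cache : Std.HashMap Int Int), MemoInv cache → n < (fuel : Int) →
    (configMemo fuel n cache).1 = g n ∧ MemoInv (configMemo fuel n cache).2 := by
  induction fuel with
  | zero =>
    intro n cache hMI hn
    have hneg : n < 0 := by exact_mod_cast hn
    rw [configMemo.eq_def, if_pos hneg]
    exact ⟨(g.eq_def n ▸ (if_pos hneg).symm), hMI⟩
  | succ f ih =>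
    intro n cache hMI hn
    by_cases hneg : n < 0
    · rw [configMemo.eq_def, if_pos hneg]
      exact ⟨(g.eq_def n ▸ (if_pos hneg).symm), hMI⟩
    · rw [configMemo, if_neg hneg]
      split
      · next v heq => exact ⟨hMI n v heq, hMI⟩
      · next heq =>
        by_cases h3 : n < 3
        · rw [PySem.List.pyRange_one_eq_nil (show (n - 3 + 1 : Int) ≤ 0 by omega)]
          have hgn : g n = 1 := by rw [g, if_neg hneg, fI, if_pos (by omega)]
          simp only [List.foldl_nil]
          refine ⟨by simpa using hgn.symm, ?_⟩
          intro k v hkv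
          rw [Std.HashMap.getElem?_insert] at hkv
          by_cases hk : n = k
          · subst hk
            simp only [BEq.rfl, if_pos] at hkv
            simp only [Option.some.injEq] at hkv
            rw [← hkv, hgn]
          · rw [if_neg (by simpa using hk)] at hkv
            exact hMI k v hkv
        have hinner : ∀ (offset : Int), 0 ≤ offset → offset ≤ n - 3 →
            ∀ (l : List Int), (∀ c ∈ l, 3 ≤ c ∧ c < n - offset + 1) →
            ∀ (q : Int × Std.HashMap Int Int), MemoInv q.2 →
            (l.foldl (fun q c =>
                let rc := configMemo f (n - offset - c - 1) q.2
                (q.1 + rc.1, rc.2)) q).1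
              = q.1 + (l.map (fun c => g (n - offset - c - 1))).sum ∧
            MemoInv (l.foldl (fun q c =>
                let rc := configMemo f (n - offset - c - 1) q.2
                (q.1 + rc.1, rc.2)) q).2 := by
          intro offset ho1 ho2 l
          induction l with
          | nil => intro _ q hq; exact ⟨by simp, hq⟩
          | cons c cs ihl =>
            intro hb q hq
            have hc := hb c (List.mem_cons_self ..)
            have hfn : n < (f : Int) + 1 := by push_cast at hn; exact hn
            have harg : n - offset - c - 1 < (f : Int) := by omega
            obtain ⟨hval, hmem⟩ := ih (n - offset - c - 1) q.2 hq harg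
            simp only [List.foldl_cons, List.map_cons, List.sum_cons]
            have hrest := ihl (fun x hx => hb x (List.mem_cons_of_mem _ hx))
              (q.1 + (configMemo f (n - offset - c - 1) q.2).1,
               (configMemo f (n - offset - c - 1) q.2).2) hmem
            refine ⟨?_, hrest.2⟩
            rw [hrest.1, hval]
            ring
        have houter : ∀ (l : List Int), (∀ offset ∈ l, 0 ≤ offset ∧ offset ≤ n - 3) →
            ∀ (p : Int × Std.HashMap Int Int), MemoInv p.2 →
            (l.foldl (fun p offset =>
                (PySem.List.pyRange 3 (n - offset + 1) 1).foldl (fun q c =>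
                  let rc := configMemo f (n - offset - c - 1) q.2
                  (q.1 + rc.1, rc.2)) p) p).1
              = p.1 + (l.map (fun offset => 1 + SI (n - offset - 3).toNat)).sum ∧
            MemoInv (l.foldl (fun p offset =>
                (PySem.List.pyRange 3 (n - offset + 1) 1).foldl (fun q c =>
                  let rc := configMemo f (n - offset - c - 1) q.2
                  (q.1 + rc.1, rc.2)) p) p).2 := by
          intro l
          induction l with
          | nil => intro _ p hp; exact ⟨by simp, hp⟩
          | cons o os ihl =>
            intro hb p hp
            have ho := hb o (List.mem_cons_self ..)
            have hN : 3 ≤ n - o := by omega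
            have hin := hinner o ho.1 ho.2 (PySem.List.pyRange 3 (n - o + 1) 1)
              (fun c hc => by rw [PySem.List.mem_pyRange_one] at hc; omega) p hp
            simp only [List.foldl_cons, List.map_cons, List.sum_cons]
            have hms : ((PySem.List.pyRange 3 ((n - o) + 1) 1).map
                (fun c => g ((n - o) - c - 1))).sum = 1 + SI ((n - o) - 3).toNat :=
              innerMapSum (n - o) hN
            have hrest := ihl (fun x hx => hb x (List.mem_cons_of_mem _ hx)) _ hin.2
            refine ⟨?_, hrest.2⟩
            rw [hrest.1, hin.1, hms]
            ring
        have hall := houter (PySem.List.pyRange 0 (n - 3 + 1) 1)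
          (fun x hx => by rw [PySem.List.mem_pyRange_one] at hx; omega) (1, cache) hMI
        have hsum : ((PySem.List.pyRange 0 (n - 3 + 1) 1).map
            (fun offset => 1 + SI (n - offset - 3).toNat)).sum = g n - 1 := by
          have h1 := outerFoldSum n (by omega)
          rw [PySem.List.foldl_add (PySem.List.pyRange 0 (n - 3 + 1) 1)
            (fun offset => 1 + SI (n - offset - 3).toNat) 1] at h1
          omega
        refine ⟨?_, ?_⟩
        · show (List.foldl _ (1, cache) (PySem.List.pyRange 0 (n - 3 + 1) 1)).1 = g n
          rw [hall.1, hsum]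
          ring
        · intro k v hkv
          rw [Std.HashMap.getElem?_insert] at hkv
          by_cases hk : n = k
          · subst hk
            simp only [BEq.rfl, if_pos] at hkv
            have hv1 : v = (List.foldl _ (1, cache) (PySem.List.pyRange 0 (n - 3 + 1) 1)).1 :=
              (Option.some.injEq .. ▸ hkv).symm
            rw [hv1, hall.1, hsum]
            ring
          · rw [if_neg (by simpa using hk)] at hkv
            exact hall.2 k v hkv

-- ===== VERDICT (by name: the statement is the Claim_ definition above) =====
theorem configurations_spec : Claim_equal_configurations := by
  intro n _ _
  unfold Spec_configurations
  have hMI : MemoInv (∅ : Std.HashMap Int Int) := by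
    intro k v h
    simp at h
  rw [configurations, (configMemo_eq _ n ∅ hMI (by omega)).1, alt_eq_fI]
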